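-- pv_equiv track=rewrite | github.com/sigurdvaa/adventofcode | 2015/20-Infinite-Elves-and-Infinite-Houses.py | lowest_house_with_presents_max_visits
-- ===== SOURCE A (Python) =====
-- def lowest_house_with_presents_max_visits(target: int, max_visits: int = 50) -> int:
--     max_houses = target // (11 * 2)
--     houses = [0] * max_houses
--     for house in range(1, max_houses, 1):
--         visits = 0
--         for elf in range(house, max_houses, house):
--             houses[elf] += house
--             visits += 1
--             if visits == 50:
--                 break
--
--         if houses[house] * 11 >= target:
--             return house
--
--     return -1
-- ===== SOURCE B (Python) =====
-- def lowest_house_with_presents_max_visits(target: int, max_visits: int = 50) -> int: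
--     # Per-house divisor scan (trial division up to sqrt) instead of A's shared sieve table.
--     # Note: like A, the 50-visit cap is hardcoded (A never uses max_visits).
--     for h in range(1, target // (11 * 2)):
--         total = 0
--         d = 1
--         while d * d <= h:
--             if h % d == 0:
--                 q = h // d
--                 if q <= 50:       # elf d reaches house h only within its first 50 visits
--                     total += d
--                 if d != q and d <= 50:  # elf q reaches h as its d-th visit
--                     total += q
--             d += 1
--         if total * 11 >= target:
--             return h
--     return -1
-- ===== Notes on version B (the rewrite author's own statement) =====
-- stated objective: alternative
-- what changed: Replaces A's shared sieve array (each elf adds its number to its first 50 multiples, checked house by house) with an independent per-house divisor sum computed by trial division up to sqrt(h), counting a divisor e only when h//e <= 50.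
import Mathlib
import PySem

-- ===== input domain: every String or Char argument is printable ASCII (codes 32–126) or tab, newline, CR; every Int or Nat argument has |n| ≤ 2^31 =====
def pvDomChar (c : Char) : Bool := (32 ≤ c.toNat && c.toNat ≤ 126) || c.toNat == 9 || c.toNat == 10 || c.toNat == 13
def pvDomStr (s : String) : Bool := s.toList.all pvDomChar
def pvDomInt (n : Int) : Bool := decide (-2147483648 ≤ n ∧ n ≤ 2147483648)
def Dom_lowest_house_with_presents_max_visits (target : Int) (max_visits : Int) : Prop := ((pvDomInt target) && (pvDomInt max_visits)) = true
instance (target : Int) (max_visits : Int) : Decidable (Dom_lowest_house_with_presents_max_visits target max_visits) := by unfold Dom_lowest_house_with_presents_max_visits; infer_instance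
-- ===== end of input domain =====

set_option maxHeartbeats 1000000

-- B replaces A's shared 50-visit sieve array with an independent per-house divisor scan
-- (trial division up to sqrt h); alternative decomposition, not faster.
-- Like A, B never reads max_visits (A hardcodes the 50-visit cap).
-- (The `fuel` parameters only make the loops structurally recursive; each call supplies
-- enough fuel for the loop to run exactly as in Python.)

-- ===== PORT A =====
-- inner loop: `for elf in range(house, max_houses, house): houses[elf] += house; visits += 1; if visits == 50: break`
-- (at most 50 iterations, so fuel 50 at the call site is exact)
def pvElfLoop (fuel : Nat) (houses : List Int) (house : Nat) (elf : Nat) (visits : Nat) (maxH : Nat) : List Int :=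
  match fuel with
  | 0 => houses
  | fuel + 1 =>
    if elf < maxH then
      if visits + 1 = 50 then houses.set elf (houses.getD elf 0 + (house : Int))
      else pvElfLoop fuel (houses.set elf (houses.getD elf 0 + (house : Int))) house (elf + house) (visits + 1) maxH
    else houses

-- outer loop: `for house in range(1, max_houses, 1): <elf loop>; if houses[house] * 11 >= target: return house`
-- (at most maxH iterations, so fuel maxH at the call site is exact)
def pvHouseLoop (fuel : Nat) (houses : List Int) (house : Nat) (maxH : Nat) (target : Int) : Int :=
  match fuel with
  | 0 => -1
  | fuel + 1 =>
    if house < maxH then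
      if (pvElfLoop 50 houses house house 0 maxH).getD house 0 * 11 ≥ target then (house : Int)
      else pvHouseLoop fuel (pvElfLoop 50 houses house house 0 maxH) (house + 1) maxH target
    else -1

-- `max_houses = target // (11 * 2); houses = [0] * max_houses` then the loops; -1 if the range is empty
def lowest_house_with_presents_max_visits (target : Int) (max_visits : Int) : Int :=
  pvHouseLoop (PySem.Int.floordiv target (11 * 2)).toNat
    (List.replicate (PySem.Int.floordiv target (11 * 2)).toNat 0) 1
    (PySem.Int.floordiv target (11 * 2)).toNat target

-- ===== PORT B =====
-- `d = 1; while d * d <= h: if h % d == 0: q = h // d; if q <= 50: total += d; if d != q and d <= 50: total += q; d += 1`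
-- (d stays ≤ h + 1, so fuel h + 1 at the call site is exact)
def pvTrialDiv (fuel : Nat) (h : Nat) (d : Nat) (acc : Int) : Int :=
  match fuel with
  | 0 => acc
  | fuel + 1 =>
    if d * d ≤ h then
      pvTrialDiv fuel h (d + 1)
        (if h % d = 0 then
           (if d ≠ h / d ∧ d ≤ 50
              then (if h / d ≤ 50 then acc + (d : Int) else acc) + ((h / d : Nat) : Int)
              else (if h / d ≤ 50 then acc + (d : Int) else acc))
         else acc)
    else acc

-- `for h in range(1, target // (11 * 2)): total = <trial division>; if total * 11 >= target: return h`
def pvAltLoop (fuel : Nat) (target : Int) (h : Nat) (maxH : Nat) : Int :=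
  match fuel with
  | 0 => -1
  | fuel + 1 =>
    if h < maxH then
      if pvTrialDiv (h + 1) h 1 0 * 11 ≥ target then (h : Int)
      else pvAltLoop fuel target (h + 1) maxH
    else -1

def lowest_house_with_presents_max_visits_alt (target : Int) (max_visits : Int) : Int :=
  pvAltLoop (PySem.Int.floordiv target (11 * 2)).toNat target 1 (PySem.Int.floordiv target (11 * 2)).toNat

-- ===== PRECONDITION & SPEC =====
def Spec_lowest_house_with_presents_max_visits (target : Int) (max_visits : Int) (out : Int) : Prop := out = lowest_house_with_presents_max_visits_alt target max_visits
instance (target : Int) (max_visits : Int) (out : Int) : Decidable (Spec_lowest_house_with_presents_max_visits target max_visits out) := by unfold Spec_lowest_house_with_presents_max_visits; infer_instance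

-- ===== CLAIM (what is proved, stated in full; the proofs are below) =====
def Claim_equal_lowest_house_with_presents_max_visits : Prop := ∀ (target : Int) (max_visits : Int), Dom_lowest_house_with_presents_max_visits target max_visits → Spec_lowest_house_with_presents_max_visits target max_visits (lowest_house_with_presents_max_visits target max_visits)

-- ===== LEMMAS AND PROOFS =====

-- contributions of elves 1..k-1 to house j under the 50-visit cap
def pvPartial (j k : Nat) : Int :=
  ∑ e ∈ Finset.Icc 1 (k - 1), if e ∣ j ∧ j / e ≤ 50 then (e : Int) else 0

theorem pvGetD_set (l : List Int) (n j : Nat) (x : Int) (hn : n < l.length) :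
    (l.set n x).getD j 0 = if j = n then x else l.getD j 0 := by
  rcases eq_or_ne j n with rfl | hj
  · rw [if_pos rfl]
    simp [List.getD_eq_getElem?_getD, hn]
  · rw [if_neg hj]
    simp [List.getD_eq_getElem?_getD, Ne.symm hj]

theorem pvElfLoop_length (house maxH : Nat) :
    ∀ fuel (l : List Int) (elf v : Nat), (pvElfLoop fuel l house elf v maxH).length = l.length := by
  intro fuel
  induction fuel with
  | zero =>
    intro l elf v
    rfl
  | succ n ih =>
    intro l elf v
    simp only [pvElfLoop]
    by_cases hm : elf < maxH
    · rw [if_pos hm]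
      by_cases h50 : v + 1 = 50
      · rw [if_pos h50, List.length_set]
      · rw [if_neg h50, ih, List.length_set]
    · rw [if_neg hm]

theorem pvElfLoop_char (house : Nat) (hh : 0 < house) (maxH : Nat) :
    ∀ fuel (l : List Int) (v : Nat), v + fuel = 50 → 0 < fuel → l.length = maxH → ∀ j,
      (pvElfLoop fuel l house (house * (v + 1)) v maxH).getD j 0 =
        l.getD j 0 + (if house ∣ j ∧ v + 1 ≤ j / house ∧ j / house ≤ 50 ∧ j < maxH
                        then (house : Int) else 0) := by
  intro fuel
  induction fuel with
  | zero =>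
    intro l v hsum hpos
    exact absurd hpos (lt_irrefl 0)
  | succ n ih =>
    intro l v hsum hpos hlen j
    simp only [pvElfLoop]
    by_cases hm : house * (v + 1) < maxH
    · rw [if_pos hm]
      have hn : house * (v + 1) < l.length := by rw [hlen]; exact hm
      by_cases h50 : v + 1 = 50
      · rw [if_pos h50, pvGetD_set l (house * (v + 1)) j _ hn]
        rcases eq_or_ne j (house * (v + 1)) with rfl | hj
        · rw [if_pos rfl]
          have hjd : house * (v + 1) / house = v + 1 := Nat.mul_div_cancel_left _ hh
          rw [if_pos ⟨dvd_mul_right house (v + 1), by rw [hjd], by rw [hjd]; omega, hm⟩]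
        · rw [if_neg hj, if_neg ?_]
          · rw [add_zero]
          · rintro ⟨hdvd, hle, hge, _⟩
            apply hj
            have hj2 : house * (j / house) = j := Nat.mul_div_cancel' hdvd
            have hje : j / house = v + 1 := by omega
            rw [← hj2, hje]
      · rw [if_neg h50]
        have harg : house * (v + 1) + house = house * (v + 1 + 1) := by ring
        rw [harg]
        rw [ih (l.set (house * (v + 1)) (l.getD (house * (v + 1)) 0 + (house : Int))) (v + 1)
              (by omega) (by omega) (by rw [List.length_set]; exact hlen) j]
        rw [pvGetD_set l (house * (v + 1)) j _ hn]
        rcases eq_or_ne j (house * (v + 1)) with rfl | hj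
        · rw [if_pos rfl]
          have hjd : house * (v + 1) / house = v + 1 := Nat.mul_div_cancel_left _ hh
          rw [if_neg (by rintro ⟨_, hc, _, _⟩; rw [hjd] at hc; omega)]
          rw [if_pos ⟨dvd_mul_right house (v + 1), by rw [hjd], by rw [hjd]; omega, hm⟩]
          ring
        · rw [if_neg hj, add_right_comm]
          congr 1
          by_cases hc : house ∣ j ∧ v + 1 ≤ j / house ∧ j / house ≤ 50 ∧ j < maxH
          · have hj2 : house * (j / house) = j := Nat.mul_div_cancel' hc.1
            have hne : j / house ≠ v + 1 := by
              intro he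
              exact hj (by rw [← hj2, he])
            rw [if_pos ⟨hc.1, by omega, hc.2.2.1, hc.2.2.2⟩, if_pos hc]
          · rw [if_neg (by rintro ⟨a, b, c, d⟩; exact hc ⟨a, by omega, c, d⟩), if_neg hc]
    · rw [if_neg hm, if_neg ?_]
      · rw [add_zero]
      · rintro ⟨hdvd, hle, _, hlt⟩
        have hj2 : house * (j / house) = j := Nat.mul_div_cancel' hdvd
        have h3 : house * (v + 1) ≤ house * (j / house) := Nat.mul_le_mul_left house hle
        rw [hj2] at h3
        exact absurd hlt (not_lt.mpr (le_trans (Nat.le_of_not_lt hm) h3))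

theorem pvSumEmpty (h d : Nat) (hdd : ¬ d * d ≤ h) :
    (∑ e ∈ Finset.Icc 1 h, if e ∣ h ∧ h / e ≤ 50 ∧ d ≤ e ∧ d ≤ h / e then (e : Int) else 0) = 0 := by
  apply Finset.sum_eq_zero
  intro e he
  rw [Finset.mem_Icc] at he
  rw [if_neg]
  rintro ⟨h1, _, h3, h4⟩
  exact hdd (le_trans (Nat.mul_le_mul h3 h4) (le_of_eq (Nat.mul_div_cancel' h1)))

theorem pvSumStep (h d : Nat) (hd1 : 1 ≤ d) (hdd : d * d ≤ h) :
    (∑ e ∈ Finset.Icc 1 h, if e ∣ h ∧ h / e ≤ 50 ∧ d ≤ e ∧ d ≤ h / e then (e : Int) else 0)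
      = ((if d ∣ h ∧ h / d ≤ 50 then (d : Int) else 0)
          + (if d ∣ h ∧ d ≠ h / d ∧ d ≤ 50 then ((h / d : Nat) : Int) else 0))
        + ∑ e ∈ Finset.Icc 1 h, if e ∣ h ∧ h / e ≤ 50 ∧ d + 1 ≤ e ∧ d + 1 ≤ h / e then (e : Int) else 0 := by
  have hh0 : 0 < h := lt_of_lt_of_le (Nat.mul_pos (by omega) (by omega)) hdd
  have hdh : d ≤ h := le_trans (Nat.le_mul_of_pos_left d (by omega)) hdd
  have hdq : d ≤ h / d := (Nat.le_div_iff_mul_le (by omega)).2 hdd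
  have key : ∀ e ∈ Finset.Icc 1 h,
      ((if e ∣ h ∧ h / e ≤ 50 ∧ d ≤ e ∧ d ≤ h / e then (e : Int) else 0)
        - (if e ∣ h ∧ h / e ≤ 50 ∧ d + 1 ≤ e ∧ d + 1 ≤ h / e then (e : Int) else 0))
      = ((if e = d then (if d ∣ h ∧ h / d ≤ 50 then (d : Int) else 0) else 0)
          + (if e = h / d then (if d ∣ h ∧ d ≠ h / d ∧ d ≤ 50 then ((h / d : Nat) : Int) else 0) else 0)) := by
    intro e he
    rw [Finset.mem_Icc] at he
    rcases eq_or_ne e d with hed | hed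
    · subst hed
      have hz1 : (if e ∣ h ∧ h / e ≤ 50 ∧ e + 1 ≤ e ∧ e + 1 ≤ h / e then (e : Int) else 0) = 0 :=
        if_neg (by rintro ⟨_, _, hc, _⟩; omega)
      have hz2 : (if e = h / e then (if e ∣ h ∧ e ≠ h / e ∧ e ≤ 50 then ((h / e : Nat) : Int) else 0) else 0) = 0 := by
        split_ifs with ha hb
        · exact absurd ha hb.2.1
        · rfl
        · rfl
      rw [hz1, hz2, sub_zero, if_pos rfl, add_zero]
      apply if_congr _ rfl rfl
      constructor
      · rintro ⟨h1, h2, _, _⟩; exact ⟨h1, h2⟩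
      · rintro ⟨h1, h2⟩; exact ⟨h1, h2, le_refl e, hdq⟩
    · rw [if_neg hed, zero_add]
      rcases eq_or_ne e (h / d) with heq | heq
      · subst heq
        rw [if_pos rfl]
        by_cases hdvd : d ∣ h
        · have hhe : h / (h / d) = d := Nat.div_div_self hdvd (by omega)
          have hedvd : h / d ∣ h := ⟨d, (Nat.div_mul_cancel hdvd).symm⟩
          have hz1 : (if h / d ∣ h ∧ h / (h / d) ≤ 50 ∧ d + 1 ≤ h / d ∧ d + 1 ≤ h / (h / d) then ((h / d : Nat) : Int) else 0) = 0 :=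
            if_neg (by rintro ⟨_, _, _, hc⟩; rw [hhe] at hc; omega)
          rw [hz1, sub_zero]
          by_cases h50 : d ≤ 50
          · have hp1 : (if h / d ∣ h ∧ h / (h / d) ≤ 50 ∧ d ≤ h / d ∧ d ≤ h / (h / d) then ((h / d : Nat) : Int) else 0)
                = ((h / d : Nat) : Int) :=
              if_pos ⟨hedvd, by simp [hhe, h50], hdq, by simp [hhe]⟩
            rw [hp1, if_pos ⟨hdvd, Ne.symm hed, h50⟩]
          · have hz2 : (if h / d ∣ h ∧ h / (h / d) ≤ 50 ∧ d ≤ h / d ∧ d ≤ h / (h / d) then ((h / d : Nat) : Int) else 0) = 0 :=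
              if_neg (by rintro ⟨_, hc, _, _⟩; rw [hhe] at hc; exact h50 hc)
            have hz3 : (if d ∣ h ∧ d ≠ h / d ∧ d ≤ 50 then ((h / d : Nat) : Int) else 0) = 0 :=
              if_neg (by rintro ⟨_, _, hc⟩; exact h50 hc)
            rw [hz2, hz3]
        · have hz3 : (if d ∣ h ∧ d ≠ h / d ∧ d ≤ 50 then ((h / d : Nat) : Int) else 0) = 0 :=
            if_neg (by rintro ⟨hc, _, _⟩; exact hdvd hc)
          rw [hz3]
          have hne : ∀ _ : (h / d) ∣ h, h / (h / d) ≠ d := by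
            intro hdv hc
            have hmc : h / (h / d) * (h / d) = h := Nat.div_mul_cancel hdv
            rw [hc] at hmc
            exact hdvd ⟨h / d, hmc.symm⟩
          have hiff : ((h / d) ∣ h ∧ h / (h / d) ≤ 50 ∧ d ≤ h / d ∧ d ≤ h / (h / d))
              ↔ ((h / d) ∣ h ∧ h / (h / d) ≤ 50 ∧ d + 1 ≤ h / d ∧ d + 1 ≤ h / (h / d)) := by
            constructor
            · rintro ⟨h1, h2, h3, h4⟩
              exact ⟨h1, h2, Nat.lt_of_le_of_ne h3 (Ne.symm hed), Nat.lt_of_le_of_ne h4 (Ne.symm (hne h1))⟩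
            · rintro ⟨h1, h2, h3, h4⟩
              exact ⟨h1, h2, le_trans (Nat.le_succ d) h3, le_trans (Nat.le_succ d) h4⟩
          rw [if_congr hiff rfl rfl]
          exact sub_self _
      · rw [if_neg heq]
        have hiff : (e ∣ h ∧ h / e ≤ 50 ∧ d ≤ e ∧ d ≤ h / e)
            ↔ (e ∣ h ∧ h / e ≤ 50 ∧ d + 1 ≤ e ∧ d + 1 ≤ h / e) := by
          constructor
          · rintro ⟨h1, h2, h3, h4⟩
            have hq : h / e ≠ d := by
              intro hc
              exact heq (by rw [← hc, Nat.div_div_self h1 (by omega)])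
            exact ⟨h1, h2, Nat.lt_of_le_of_ne h3 (Ne.symm hed), Nat.lt_of_le_of_ne h4 (Ne.symm hq)⟩
          · rintro ⟨h1, h2, h3, h4⟩
            exact ⟨h1, h2, le_trans (Nat.le_succ d) h3, le_trans (Nat.le_succ d) h4⟩
        rw [if_congr hiff rfl rfl]
        exact sub_self _
  have hsum : (∑ e ∈ Finset.Icc 1 h, if e ∣ h ∧ h / e ≤ 50 ∧ d ≤ e ∧ d ≤ h / e then (e : Int) else 0)
      - (∑ e ∈ Finset.Icc 1 h, if e ∣ h ∧ h / e ≤ 50 ∧ d + 1 ≤ e ∧ d + 1 ≤ h / e then (e : Int) else 0)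
      = ∑ e ∈ Finset.Icc 1 h,
          ((if e = d then (if d ∣ h ∧ h / d ≤ 50 then (d : Int) else 0) else 0)
            + (if e = h / d then (if d ∣ h ∧ d ≠ h / d ∧ d ≤ 50 then ((h / d : Nat) : Int) else 0) else 0)) := by
    rw [← Finset.sum_sub_distrib]
    exact Finset.sum_congr rfl key
  rw [Finset.sum_add_distrib, Finset.sum_ite_eq', Finset.sum_ite_eq'] at hsum
  rw [if_pos (Finset.mem_Icc.mpr ⟨hd1, hdh⟩)] at hsum
  rw [if_pos (Finset.mem_Icc.mpr ⟨(Nat.one_le_div_iff (by omega)).2 hdh, Nat.div_le_self h d⟩)] at hsum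
  linarith

theorem pvTrialDiv_eq (h : Nat) :
    ∀ fuel d acc, 1 ≤ d → h + 1 - d ≤ fuel →
      pvTrialDiv fuel h d acc =
        acc + ∑ e ∈ Finset.Icc 1 h, if e ∣ h ∧ h / e ≤ 50 ∧ d ≤ e ∧ d ≤ h / e then (e : Int) else 0 := by
  intro fuel
  induction fuel with
  | zero =>
    intro d acc hd1 hn
    have hdd : ¬ d * d ≤ h := by
      intro hc
      have h1 : d ≤ d * d := Nat.le_mul_of_pos_left d (by omega)
      omega
    rw [pvSumEmpty h d hdd, add_zero]
    rfl
  | succ n ih =>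
    intro d acc hd1 hn
    simp only [pvTrialDiv]
    by_cases hdd : d * d ≤ h
    · rw [if_pos hdd]
      have hdh : d ≤ h := le_trans (Nat.le_mul_of_pos_left d (by omega)) hdd
      rw [ih (d + 1) _ (by omega) (by omega)]
      rw [pvSumStep h d hd1 hdd]
      by_cases hmod : h % d = 0
      · have hdvd : d ∣ h := Nat.dvd_of_mod_eq_zero hmod
        rw [if_pos hmod]
        split_ifs <;> (first | tauto | ring)
      · have hdvd : ¬ d ∣ h := fun hc => hmod (by obtain ⟨c, hc2⟩ := hc; subst hc2; exact Nat.mul_mod_right d c)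
        rw [if_neg hmod]
        rw [if_neg (by tauto), if_neg (by tauto)]
        ring
    · rw [if_neg hdd, pvSumEmpty h d hdd, add_zero]

theorem pvSum_split (m : Nat) :
    (∑ e ∈ Finset.Icc 1 (m + 1), if e ∣ (m + 1) ∧ (m + 1) / e ≤ 50 ∧ 1 ≤ e ∧ 1 ≤ (m + 1) / e then (e : Int) else 0)
      = (∑ e ∈ Finset.Icc 1 m, if e ∣ (m + 1) ∧ (m + 1) / e ≤ 50 then (e : Int) else 0) + ((m + 1 : Nat) : Int) := by
  rw [Finset.sum_Icc_succ_top (by omega : 1 ≤ m + 1)]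
  congr 1
  · apply Finset.sum_congr rfl
    intro e he
    rw [Finset.mem_Icc] at he
    apply if_congr _ rfl rfl
    constructor
    · rintro ⟨h1, h2, _, _⟩; exact ⟨h1, h2⟩
    · rintro ⟨h1, h2⟩
      exact ⟨h1, h2, he.1, (Nat.one_le_div_iff (by omega)).2 (by omega)⟩
  · have hds : (m + 1) / (m + 1) = 1 := Nat.div_self (by omega)
    rw [if_pos ⟨dvd_refl _, by rw [hds]; omega, by omega, by rw [hds]⟩]

theorem pvHouseLoop_eq (maxH : Nat) (target : Int) :
    ∀ fuel house (l : List Int), 0 < house → maxH - house ≤ fuel → l.length = maxH →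
      (∀ j, 0 < j → j < maxH → l.getD j 0 = pvPartial j house) →
      pvHouseLoop fuel l house maxH target = pvAltLoop fuel target house maxH := by
  intro fuel
  induction fuel with
  | zero =>
    intro house l hh hn hlen hinv
    rfl
  | succ n ih =>
    intro house l hh hn hlen hinv
    simp only [pvHouseLoop, pvAltLoop]
    by_cases hm : house < maxH
    · obtain ⟨m, rfl⟩ : ∃ m, house = m + 1 := ⟨house - 1, by omega⟩
      rw [if_pos hm, if_pos hm]
      have hchar := pvElfLoop_char (m + 1) hh maxH 50 l 0 (by omega) (by omega) hlen
      simp only [Nat.mul_one, Nat.zero_add] at hchar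
      have hval : (pvElfLoop 50 l (m + 1) (m + 1) 0 maxH).getD (m + 1) 0 = pvTrialDiv (m + 1 + 1) (m + 1) 1 0 := by
        rw [hchar (m + 1)]
        have hds : (m + 1) / (m + 1) = 1 := Nat.div_self (by omega)
        rw [if_pos ⟨dvd_refl _, by rw [hds], by rw [hds]; omega, hm⟩]
        rw [hinv (m + 1) (by omega) hm]
        rw [pvTrialDiv_eq (m + 1) (m + 1 + 1) 1 0 (by omega) (by omega)]
        rw [pvSum_split m]
        simp only [pvPartial, Nat.add_sub_cancel]
        ring
      rw [hval]
      by_cases hg : pvTrialDiv (m + 1 + 1) (m + 1) 1 0 * 11 ≥ target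
      · rw [if_pos hg, if_pos hg]
      · rw [if_neg hg, if_neg hg]
        apply ih (m + 1 + 1) _ (Nat.succ_pos _) (by omega)
        · rw [pvElfLoop_length (m + 1) maxH 50 l (m + 1) 0]
          exact hlen
        · intro j hj hjm
          rw [hchar j, hinv j hj hjm]
          have hfin : pvPartial j (m + 1 + 1)
              = pvPartial j (m + 1) + (if (m + 1) ∣ j ∧ j / (m + 1) ≤ 50 then ((m + 1 : Nat) : Int) else 0) := by
            simp only [pvPartial, Nat.add_sub_cancel]
            exact Finset.sum_Icc_succ_top (by omega) _
          rw [hfin]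
          congr 1
          apply if_congr _ rfl rfl
          constructor
          · rintro ⟨h1, _, h3, _⟩; exact ⟨h1, h3⟩
          · rintro ⟨h1, h2⟩
            exact ⟨h1, (Nat.one_le_div_iff (by omega)).2 (Nat.le_of_dvd hj h1), h2, hjm⟩
    · rw [if_neg hm, if_neg hm]

-- ===== VERDICT (by name: the statement is the Claim_ definition above) =====
theorem lowest_house_with_presents_max_visits_spec : Claim_equal_lowest_house_with_presents_max_visits := by
  intro target max_visits _
  unfold Spec_lowest_house_with_presents_max_visits
  unfold lowest_house_with_presents_max_visits lowest_house_with_presents_max_visits_alt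
  apply pvHouseLoop_eq (PySem.Int.floordiv target (11 * 2)).toNat target
    (PySem.Int.floordiv target (11 * 2)).toNat 1 _ Nat.one_pos (by omega)
  · simp
  · intro j hj hjm
    have h0 : (List.replicate (PySem.Int.floordiv target (11 * 2)).toNat (0 : Int)).getD j 0 = 0 := by
      simp only [List.getD_eq_getElem?_getD, List.getElem?_replicate]
      split <;> rfl
    rw [h0]
    unfold pvPartial
    rw [show (1 : Nat) - 1 = 0 from rfl, Finset.Icc_eq_empty (by omega), Finset.sum_empty]
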